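-- pv_equiv track=rewrite | github.com/pj-000/pptagent | agents/planner.py | _looks_like_missing_js_comma_after_string
-- ===== SOURCE A (Python) =====
-- def _looks_like_missing_js_comma_after_string(code: str, quote_index: int) -> bool:
--     j = quote_index + 1
--     saw_newline = False
--
--     while j < len(code) and code[j].isspace():
--         if code[j] in "\r\n":
--             saw_newline = True
--         j += 1
--
--     if not saw_newline or j >= len(code):
--         return False
--
--     if not (code[j].isalpha() or code[j] in "_$"):
--         return False
--
--     k = j + 1
--     while k < len(code) and (code[k].isalnum() or code[k] in "_$"):
--         k += 1
--     while k < len(code) and code[k].isspace():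
--         k += 1
--
--     return k < len(code) and code[k] == ":"
-- ===== SOURCE B (Python) =====
-- import re
--
-- # A missing "," after a JS string literal: skip the rest of the line's whitespace,
-- # require a newline somewhere in the whitespace run, then an identifier followed
-- # (after optional whitespace) by ":".
-- _PAT = re.compile(r'[^\S\r\n]*[\r\n]\s*([^\W\d]|\$)[\w$]*\s*:')
--
-- def _looks_like_missing_js_comma_after_string(code: str, quote_index: int) -> bool:
--     return bool(_PAT.match(code[quote_index + 1:]))
-- ===== Notes on version B (the rewrite author's own statement) =====
-- stated objective: idiomatic
-- what changed: Replaces the three hand-written index-scanning while-loops and the saw_newline flag with a single precompiled regular expression matched against the slice code[quote_index+1:].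
-- outside the precondition, e.g. on _looks_like_missing_js_comma_after_string('\na:A ', -2): A returns True, B returns False
import Mathlib
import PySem

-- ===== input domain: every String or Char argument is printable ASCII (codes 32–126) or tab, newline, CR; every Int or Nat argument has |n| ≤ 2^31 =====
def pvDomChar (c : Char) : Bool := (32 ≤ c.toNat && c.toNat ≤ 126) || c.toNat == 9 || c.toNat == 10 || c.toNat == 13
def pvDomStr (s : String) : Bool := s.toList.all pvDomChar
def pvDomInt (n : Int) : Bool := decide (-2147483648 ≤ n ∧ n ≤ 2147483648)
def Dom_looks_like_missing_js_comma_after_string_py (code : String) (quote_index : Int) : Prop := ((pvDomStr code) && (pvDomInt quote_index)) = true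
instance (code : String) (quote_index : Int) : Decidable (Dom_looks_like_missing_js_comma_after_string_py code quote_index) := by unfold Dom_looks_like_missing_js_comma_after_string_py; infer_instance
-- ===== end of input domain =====

-- B replaces A's three hand-written index-scanning while-loops and the saw_newline flag with
-- one regular-expression match against the slice code[quote_index+1:] (idiomatic).


-- ===== PORT A =====
-- while j < len(code) and code[j].isspace(): if code[j] in "\r\n": saw_newline = True; j += 1
def pvA_skipWs (c : List Char) (j : Int) (saw : Bool) : Int × Bool :=
  if _h : j < (c.length : Int) then
    match PySem.List.pyGet? c j with
    | some ch =>
        if PySem.Chars.isspace ch then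
          pvA_skipWs c (j + 1) (saw || (ch == '\r' || ch == '\n'))
        else (j, saw)
    | none => (j, saw)
  else (j, saw)
termination_by ((c.length : Int) - j).toNat
decreasing_by omega

-- while k < len(code) and (code[k].isalnum() or code[k] in "_$"): k += 1
def pvA_skipIdent (c : List Char) (k : Int) : Int :=
  if _h : k < (c.length : Int) then
    match PySem.List.pyGet? c k with
    | some ch =>
        if PySem.Chars.isalnum ch || (ch == '_' || ch == '$') then pvA_skipIdent c (k + 1) else k
    | none => k
  else k
termination_by ((c.length : Int) - k).toNat
decreasing_by omega

-- while k < len(code) and code[k].isspace(): k += 1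
def pvA_skipWs2 (c : List Char) (k : Int) : Int :=
  if _h : k < (c.length : Int) then
    match PySem.List.pyGet? c k with
    | some ch => if PySem.Chars.isspace ch then pvA_skipWs2 c (k + 1) else k
    | none => k
  else k
termination_by ((c.length : Int) - k).toNat
decreasing_by omega

def looks_like_missing_js_comma_after_string_py (code : String) (quote_index : Int) : Bool :=
  let c := code.toList
  let r := pvA_skipWs c (quote_index + 1) false
  let j := r.1
  let saw_newline := r.2
  if !saw_newline || (c.length : Int) ≤ j then false
  else
    match PySem.List.pyGet? c j with
    | some ch =>
        if !(PySem.Chars.isalpha ch || (ch == '_' || ch == '$')) then false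
        else
          let k := pvA_skipIdent c (j + 1)
          let k := pvA_skipWs2 c k
          if k < (c.length : Int) then PySem.List.pyGet? c k == some ':' else false
    | none => false

-- ===== PORT B =====
-- B is:  bool(re.match(r'[^\S\r\n]*[\r\n]\s*([^\W\d]|\$)[\w$]*\s*:', code[quote_index+1:]))
-- The matcher below transliterates that pattern piece by piece; each character class is
-- exact on the stated ASCII domain (\s ↔ isspace, [^\W\d] ↔ isalpha or '_', \w ↔ isalnum or '_').
def pvB_isNL (ch : Char) : Bool := ch == '\r' || ch == '\n'             -- [\r\n]
def pvB_identStart (ch : Char) : Bool := PySem.Chars.isalpha ch || ch == '_' || ch == '$'  -- [^\W\d]|\$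
def pvB_word (ch : Char) : Bool := PySem.Chars.isalnum ch || ch == '_' || ch == '$'        -- [\w$]

def pvB_match (s : List Char) : Bool :=
  match s.dropWhile (fun ch => PySem.Chars.isspace ch && !pvB_isNL ch) with  -- [^\S\r\n]*
  | [] => false
  | ch :: rest =>
    if pvB_isNL ch then                                                      -- [\r\n]
      match rest.dropWhile PySem.Chars.isspace with                          -- \s*
      | [] => false
      | c0 :: r0 =>
        if pvB_identStart c0 then                                            -- ([^\W\d]|\$)
          match (r0.dropWhile pvB_word).dropWhile PySem.Chars.isspace with   -- [\w$]*\s*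
          | c :: _ => c == ':'                                               -- :
          | [] => false
        else false
    else false

def looks_like_missing_js_comma_after_string_py_alt (code : String) (quote_index : Int) : Bool :=
  pvB_match (PySem.List.slice code.toList (some (quote_index + 1)) none)

-- ===== PRECONDITION & SPEC =====
-- Pre_ excludes quote_index < -1: there A indexes code[j] with a negative j, so Python's
-- end-relative wraparound makes A rescan the string from an end-relative position (and raise
-- IndexError when quote_index + 1 < -len(code)), while B's slice clamps at the start — both
-- corner behaviours are implementation accidents and neither is the function's intent
-- (quote_index is the index of a quote character in code, hence nonnegative).
def Pre_looks_like_missing_js_comma_after_string_py (code : String) (quote_index : Int) : Prop :=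
  -1 ≤ quote_index
instance (code : String) (quote_index : Int) : Decidable (Pre_looks_like_missing_js_comma_after_string_py code quote_index) := by unfold Pre_looks_like_missing_js_comma_after_string_py; infer_instance

def pvWitness_looks_like_missing_js_comma_after_string_py : String × Int := ("\"\na :", 0)

def Spec_looks_like_missing_js_comma_after_string_py (code : String) (quote_index : Int) (out : Bool) : Prop := out = looks_like_missing_js_comma_after_string_py_alt code quote_index
instance (code : String) (quote_index : Int) (out : Bool) : Decidable (Spec_looks_like_missing_js_comma_after_string_py code quote_index out) := by unfold Spec_looks_like_missing_js_comma_after_string_py; infer_instance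

-- ===== CLAIM (what is proved, stated in full; the proofs are below) =====
def Claim_equal_looks_like_missing_js_comma_after_string_py : Prop := ∀ (code : String) (quote_index : Int), Dom_looks_like_missing_js_comma_after_string_py code quote_index → Pre_looks_like_missing_js_comma_after_string_py code quote_index → Spec_looks_like_missing_js_comma_after_string_py code quote_index (looks_like_missing_js_comma_after_string_py code quote_index)

-- ===== LEMMAS AND PROOFS =====

-- the common characterisation both ports are reduced to: scan the suffix structurally
def pvHeadColon (v : List Char) : Bool :=
  match v with
  | c :: _ => c == ':'
  | [] => false

def pvScan (s : List Char) : Bool :=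
  (s.takeWhile PySem.Chars.isspace).any pvB_isNL &&
  (match s.dropWhile PySem.Chars.isspace with
   | [] => false
   | c0 :: r0 =>
     pvB_identStart c0 && pvHeadColon ((r0.dropWhile pvB_word).dropWhile PySem.Chars.isspace))


theorem pvB_eq_scan (s : List Char) : pvB_match s = pvScan s := by
  induction s with
  | nil => rfl
  | cons ch rest ih =>
    by_cases hnl : pvB_isNL ch = true
    · have hsp : PySem.Chars.isspace ch = true := by
        have : ch = '\r' ∨ ch = '\n' := by
          simpa [pvB_isNL] using hnl
        rcases this with h | h <;> subst h <;> decide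
      simp [pvB_match, pvScan, pvHeadColon, hnl, hsp]
    · by_cases hsp : PySem.Chars.isspace ch = true
      · have hstep : pvB_match (ch :: rest) = pvB_match rest := by
          simp [pvB_match, hsp, hnl]
        rw [hstep, ih]
        simp [pvScan, pvHeadColon, hsp, hnl]
      · simp [pvB_match, pvScan, pvHeadColon, hsp, hnl]

theorem pvDrop_toNat_add (c : List Char) (j : Int) (hj : 0 ≤ j) (m : Nat) :
    c.drop ((j + (m : Int)).toNat) = (c.drop j.toNat).drop m := by
  rw [List.drop_drop]
  congr 1
  omega

theorem pvGet_drop (c : List Char) (i : Int) (hi : 0 ≤ i) :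
    PySem.List.pyGet? c i = (c.drop i.toNat)[0]? := by
  rw [PySem.List.pyGet?_of_nonneg c hi, List.getElem?_drop]
  simp

theorem pvDropWhile_eq (p : Char → Bool) (s : List Char) :
    s.drop (s.takeWhile p).length = s.dropWhile p := by
  nth_rewrite 2 [← List.takeWhile_append_dropWhile (p := p) (l := s)]
  exact List.drop_left

theorem pvLen_split (p : Char → Bool) (s : List Char) :
    (s.takeWhile p).length + (s.dropWhile p).length = s.length := by
  nth_rewrite 3 [← List.takeWhile_append_dropWhile (p := p) (l := s)]
  rw [List.length_append]

theorem pvDrop_succ (c : List Char) (j : Int) (hj : 0 ≤ j) (x : Char) (xs : List Char)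
    (hs : c.drop j.toNat = x :: xs) : c.drop ((j + 1).toNat) = xs := by
  rw [show (j + 1).toNat = j.toNat + 1 by omega, ← List.drop_drop, hs]
  rfl

theorem pvA_skipWs_eq (c : List Char) (s : List Char) (j : Int) (saw : Bool)
    (hj : 0 ≤ j) (hs : c.drop j.toNat = s) :
    pvA_skipWs c j saw =
      (j + ((s.takeWhile PySem.Chars.isspace).length : Int),
       saw || (s.takeWhile PySem.Chars.isspace).any pvB_isNL) := by
  induction s generalizing j saw with
  | nil =>
    have hlen : ¬ j < (c.length : Int) := by
      have := List.drop_eq_nil_iff.mp hs; omega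
    rw [pvA_skipWs]
    simp [hlen]
  | cons ch rest ih =>
    have hlt : j.toNat < c.length := by
      by_contra h
      rw [List.drop_eq_nil_of_le (by omega)] at hs
      simp at hs
    have hget : PySem.List.pyGet? c j = some ch := by
      rw [pvGet_drop c j hj, hs]; rfl
    have hrest : c.drop ((j + 1).toNat) = rest := pvDrop_succ c j hj ch rest hs
    rw [pvA_skipWs, dif_pos (by omega : j < (c.length : Int))]
    simp only [hget]
    by_cases hsp : PySem.Chars.isspace ch = true
    · rw [if_pos hsp, ih _ _ (by omega) hrest]
      simp only [List.takeWhile_cons, hsp, if_true, List.length_cons, List.any_cons,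
        Prod.mk.injEq]
      constructor
      · push_cast; omega
      · simp [pvB_isNL, Bool.or_assoc]
    · rw [if_neg hsp]
      simp [hsp]

theorem pvA_skipIdent_eq (c : List Char) (s : List Char) (k : Int)
    (hk : 0 ≤ k) (hs : c.drop k.toNat = s) :
    pvA_skipIdent c k = k + ((s.takeWhile pvB_word).length : Int) := by
  induction s generalizing k with
  | nil =>
    have hlen : ¬ k < (c.length : Int) := by
      have := List.drop_eq_nil_iff.mp hs; omega
    rw [pvA_skipIdent]
    simp [hlen]
  | cons ch rest ih =>
    have hlt : k.toNat < c.length := by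
      by_contra h
      rw [List.drop_eq_nil_of_le (by omega)] at hs
      simp at hs
    have hget : PySem.List.pyGet? c k = some ch := by
      rw [pvGet_drop c k hk, hs]; rfl
    have hrest : c.drop ((k + 1).toNat) = rest := pvDrop_succ c k hk ch rest hs
    rw [pvA_skipIdent, dif_pos (by omega : k < (c.length : Int))]
    simp only [hget]
    have hword : (PySem.Chars.isalnum ch || (ch == '_' || ch == '$')) = pvB_word ch := by
      simp [pvB_word, Bool.or_assoc]
    by_cases hw : pvB_word ch = true
    · rw [hword, if_pos hw, ih _ (by omega) hrest]
      simp [hw]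
      omega
    · rw [hword, if_neg hw]
      simp [hw]

theorem pvA_skipWs2_eq (c : List Char) (s : List Char) (k : Int)
    (hk : 0 ≤ k) (hs : c.drop k.toNat = s) :
    pvA_skipWs2 c k = k + ((s.takeWhile PySem.Chars.isspace).length : Int) := by
  induction s generalizing k with
  | nil =>
    have hlen : ¬ k < (c.length : Int) := by
      have := List.drop_eq_nil_iff.mp hs; omega
    rw [pvA_skipWs2]
    simp [hlen]
  | cons ch rest ih =>
    have hlt : k.toNat < c.length := by
      by_contra h
      rw [List.drop_eq_nil_of_le (by omega)] at hs
      simp at hs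
    have hget : PySem.List.pyGet? c k = some ch := by
      rw [pvGet_drop c k hk, hs]; rfl
    have hrest : c.drop ((k + 1).toNat) = rest := pvDrop_succ c k hk ch rest hs
    rw [pvA_skipWs2, dif_pos (by omega : k < (c.length : Int))]
    simp only [hget]
    by_cases hsp : PySem.Chars.isspace ch = true
    · rw [if_pos hsp, ih _ (by omega) hrest]
      simp [hsp]
      omega
    · rw [if_neg hsp]
      simp [hsp]

theorem pvTail (c : List Char) (i : Int) (hi : 0 ≤ i) (v : List Char)
    (hv : c.drop i.toNat = v) :
    (if i < (c.length : Int) then PySem.List.pyGet? c i == some ':' else false)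
    = pvHeadColon v := by
  unfold pvHeadColon
  match v with
  | [] =>
    have : ¬ i < (c.length : Int) := by
      have := List.drop_eq_nil_iff.mp hv; omega
    simp [this]
  | c0 :: r0 =>
    have hlt : i.toNat < c.length := by
      by_contra h
      rw [List.drop_eq_nil_of_le (by omega)] at hv
      simp at hv
    have hget : PySem.List.pyGet? c i = some c0 := by
      rw [pvGet_drop c i hi, hv]; rfl
    rw [if_pos (by omega : i < (c.length : Int)), hget]
    simp

theorem pvA_eq_scan (c : List Char) (j : Int) (hj : 0 ≤ j) :
    (if !(pvA_skipWs c j false).2 || (c.length : Int) ≤ (pvA_skipWs c j false).1 then false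
     else
       match PySem.List.pyGet? c (pvA_skipWs c j false).1 with
       | some ch =>
           if !(PySem.Chars.isalpha ch || (ch == '_' || ch == '$')) then false
           else
             if pvA_skipWs2 c (pvA_skipIdent c ((pvA_skipWs c j false).1 + 1)) < (c.length : Int) then
               PySem.List.pyGet? c (pvA_skipWs2 c (pvA_skipIdent c ((pvA_skipWs c j false).1 + 1))) == some ':'
             else false
       | none => false) = pvScan (c.drop j.toNat) := by
  have hsln : (c.drop j.toNat).length = c.length - j.toNat := List.length_drop
  rw [pvA_skipWs_eq c (c.drop j.toNat) j false hj rfl]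
  set s := c.drop j.toNat with hs
  set ws := s.takeWhile PySem.Chars.isspace with hws
  set t := s.dropWhile PySem.Chars.isspace with hts
  have hsum : ws.length + t.length = s.length := pvLen_split _ s
  have hdropt : c.drop ((j + (ws.length : Int)).toNat) = t := by
    rw [pvDrop_toNat_add c j hj, ← hs, hws, pvDropWhile_eq]
  simp only [Bool.false_or]
  unfold pvScan
  rw [← hws, ← hts]
  cases hb : ws.any pvB_isNL with
  | false => simp
  | true =>
    simp only [Bool.not_true, Bool.false_or, Bool.true_and]
    match ht : t with
    | [] =>
      have hlen : (c.length : Int) ≤ j + (ws.length : Int) := by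
        simp at hsum; omega
      simp [hlen]
    | c0 :: r0 =>
      have hlenlt : j + (ws.length : Int) < (c.length : Int) := by
        simp at hsum; omega
      have hget0 : PySem.List.pyGet? c (j + (ws.length : Int)) = some c0 := by
        rw [pvGet_drop c _ (by omega), hdropt]; simp
      rw [if_neg (by simp; omega)]
      simp only [hget0]
      have hid : (PySem.Chars.isalpha c0 || (c0 == '_' || c0 == '$')) = pvB_identStart c0 := by
        simp [pvB_identStart, Bool.or_assoc]
      rw [hid]
      cases hidv : pvB_identStart c0 with
      | false => simp
      | true =>
        simp only [Bool.not_true, Bool.true_and]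
        rw [if_neg (by simp)]
        have hd1 : c.drop ((j + (ws.length : Int) + 1).toNat) = r0 := by
          apply pvDrop_succ c _ (by omega) c0 r0
          rw [hdropt]
        rw [pvA_skipIdent_eq c r0 _ (by omega) hd1]
        have hd2 : c.drop ((j + (ws.length : Int) + 1 + ((r0.takeWhile pvB_word).length : Int)).toNat)
            = r0.dropWhile pvB_word := by
          rw [show (j + (ws.length : Int) + 1 + ((r0.takeWhile pvB_word).length : Int))
              = (j + (ws.length : Int) + 1) + ((r0.takeWhile pvB_word).length : Int) by ring,
            pvDrop_toNat_add c _ (by omega), hd1, pvDropWhile_eq]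
        rw [pvA_skipWs2_eq c (r0.dropWhile pvB_word) _ (by omega) hd2]
        have hd3 : c.drop ((j + (ws.length : Int) + 1 + ((r0.takeWhile pvB_word).length : Int)
            + (((r0.dropWhile pvB_word).takeWhile PySem.Chars.isspace).length : Int)).toNat)
            = (r0.dropWhile pvB_word).dropWhile PySem.Chars.isspace := by
          rw [pvDrop_toNat_add c _ (by omega), hd2, pvDropWhile_eq]
        exact pvTail c _ (by omega) _ hd3

-- ===== VERDICT (by name: the statement is the Claim_ definition above) =====
theorem looks_like_missing_js_comma_after_string_py_spec : Claim_equal_looks_like_missing_js_comma_after_string_py := by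
  intro code quote_index _hdom hpre
  have hj : (0 : Int) ≤ quote_index + 1 := by
    unfold Pre_looks_like_missing_js_comma_after_string_py at hpre; omega
  unfold Spec_looks_like_missing_js_comma_after_string_py
  unfold looks_like_missing_js_comma_after_string_py looks_like_missing_js_comma_after_string_py_alt
  rw [pvB_eq_scan, PySem.List.slice_from code.toList hj]
  exact pvA_eq_scan code.toList (quote_index + 1) hj
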